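-- pv_equiv track=rewrite | github.com/wdi2020/wdi_python | kolokwia_2007/last_page/zad2b.py | meth
-- ===== SOURCE A (Python) =====
-- def in_buond(i,j,n):
--     return i>=0 and i<n and j>=0 and j<n
--
-- def suma_prze(tab,i,j):
--     suma = 0
--     i_cp,j_cp = i,j
--     while in_buond(i_cp,j_cp,len(tab)):
--         suma += tab[i_cp][j_cp]
--         i_cp-=1
--         j_cp-=1
--     i_cp,j_cp = i,j
--     while in_buond(i_cp,j_cp,len(tab)):
--         suma += tab[i_cp][j_cp]
--         i_cp+=1
--         j_cp+=1
--     i_cp,j_cp = i,j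
--     while in_buond(i_cp,j_cp,len(tab)):
--         suma += tab[i_cp][j_cp]
--         i_cp-=1
--         j_cp+=1
--     i_cp,j_cp = i,j
--     while in_buond(i_cp,j_cp,len(tab)):
--         suma += tab[i_cp][j_cp]
--         i_cp+=1
--         j_cp-=1
--     return suma
--
-- def meth(tab):
--     row,col = 0,0
--     max_val = 0
--     for i in range(len(tab)):
--         for j in range(len(tab)):
--             if suma_prze(tab,i,j)>max_val:
--                 max_val = max(max_val,suma_prze(tab,i,j))
--                 row,col = i,j
--     return row,col
-- ===== SOURCE B (Python) =====
-- def _diag_sum(tab, n, d):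
--     # sum of the main diagonal {(r, r-d) : both in range}, i.e. cells with i - j == d
--     return sum(tab[r][r - d] for r in range(max(0, d), min(n, n + d)))
--
-- def _anti_sum(tab, n, s):
--     # sum of the anti-diagonal {(r, s-r) : both in range}, i.e. cells with i + j == s
--     return sum(tab[r][s - r] for r in range(max(0, s - n + 1), min(n, s + 1)))
--
-- def meth(tab):
--     n = len(tab)
--     diag1 = [_diag_sum(tab, n, k - (n - 1)) for k in range(2 * n - 1)]
--     diag2 = [_anti_sum(tab, n, s) for s in range(2 * n - 1)]
--     row, col, max_val = 0, 0, 0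
--     for i in range(n):
--         for j in range(n):
--             s = diag1[i - j + n - 1] + diag2[i + j] + 2 * tab[i][j]
--             if s > max_val:
--                 max_val = s
--                 row, col = i, j
--     return row, col
-- ===== Notes on version B (the rewrite author's own statement) =====
-- stated objective: faster
-- what changed: Instead of re-walking both diagonals from every cell (four while-loops per cell, O(n) each), B precomputes the sum of every i-j diagonal and every i+j anti-diagonal once, then evaluates each cell in O(1) as diag1[i-j]+diag2[i+j]+2*tab[i][j].
import Mathlib
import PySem

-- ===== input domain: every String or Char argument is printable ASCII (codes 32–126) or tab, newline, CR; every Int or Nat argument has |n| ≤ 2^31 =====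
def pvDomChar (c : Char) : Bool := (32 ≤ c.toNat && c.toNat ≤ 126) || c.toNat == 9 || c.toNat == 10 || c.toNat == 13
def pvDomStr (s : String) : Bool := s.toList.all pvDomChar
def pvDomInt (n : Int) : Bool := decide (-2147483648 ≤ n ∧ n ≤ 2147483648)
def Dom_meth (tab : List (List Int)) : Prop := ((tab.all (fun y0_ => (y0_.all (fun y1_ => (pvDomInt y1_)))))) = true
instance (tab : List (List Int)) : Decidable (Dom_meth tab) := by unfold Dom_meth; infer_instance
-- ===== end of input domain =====

-- B replaces A's per-cell diagonal walks (O(n^3)) by per-diagonal prefix sums computed once (O(n^2)); return values agree on all square tables.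

-- ===== PORT A =====
-- tab[i][j]: both ports index only with 0 ≤ i < len(tab) and 0 ≤ j < len(tab[i]) (guaranteed by the
-- loop guards together with Pre_meth), where Python indexing is exactly this total getD access.
def pyCell (tab : List (List Int)) (i j : Int) : Int :=
  PySem.List.pyGetD (PySem.List.pyGetD tab i []) j 0

def inBuond (i j n : Int) : Bool :=
  decide (0 ≤ i) && decide (i < n) && decide (0 ≤ j) && decide (j < n)

-- the four while-loops of suma_prze, one per diagonal direction
def loopUL (tab : List (List Int)) (n i j : Int) : Int :=
  if inBuond i j n then pyCell tab i j + loopUL tab n (i - 1) (j - 1) else 0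
termination_by (i + 1).toNat
decreasing_by simp [inBuond] at *; omega

def loopDR (tab : List (List Int)) (n i j : Int) : Int :=
  if inBuond i j n then pyCell tab i j + loopDR tab n (i + 1) (j + 1) else 0
termination_by (n - i).toNat
decreasing_by simp [inBuond] at *; omega

def loopUR (tab : List (List Int)) (n i j : Int) : Int :=
  if inBuond i j n then pyCell tab i j + loopUR tab n (i - 1) (j + 1) else 0
termination_by (i + 1).toNat
decreasing_by simp [inBuond] at *; omega

def loopDL (tab : List (List Int)) (n i j : Int) : Int :=
  if inBuond i j n then pyCell tab i j + loopDL tab n (i + 1) (j - 1) else 0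
termination_by (n - i).toNat
decreasing_by simp [inBuond] at *; omega

def sumaPrze (tab : List (List Int)) (i j : Int) : Int :=
  let n : Int := tab.length
  loopUL tab n i j + loopDR tab n i j + loopUR tab n i j + loopDL tab n i j

def meth (tab : List (List Int)) : Int × Int :=
  let n : Int := tab.length
  let st := (PySem.List.pyRange 0 n 1).foldl (fun st i =>
      (PySem.List.pyRange 0 n 1).foldl (fun st j =>
        if sumaPrze tab i j > st.1 then (max st.1 (sumaPrze tab i j), i, j) else st) st)
    ((0 : Int), (0 : Int), (0 : Int))
  (st.2.1, st.2.2)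

-- ===== PORT B =====
def diagSum1 (tab : List (List Int)) (n d : Int) : Int :=
  (PySem.List.pyRange (max 0 d) (min n (n + d)) 1).foldl (fun acc r => acc + pyCell tab r (r - d)) 0

def diagSum2 (tab : List (List Int)) (n s : Int) : Int :=
  (PySem.List.pyRange (max 0 (s - n + 1)) (min n (s + 1)) 1).foldl (fun acc r => acc + pyCell tab r (s - r)) 0

def meth_alt (tab : List (List Int)) : Int × Int :=
  let n : Int := tab.length
  let diag1 := (PySem.List.pyRange 0 (2 * n - 1) 1).map (fun k => diagSum1 tab n (k - (n - 1)))
  let diag2 := (PySem.List.pyRange 0 (2 * n - 1) 1).map (fun s => diagSum2 tab n s)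
  let st := (PySem.List.pyRange 0 n 1).foldl (fun st i =>
      (PySem.List.pyRange 0 n 1).foldl (fun st j =>
        let s := PySem.List.pyGetD diag1 (i - j + n - 1) 0 + PySem.List.pyGetD diag2 (i + j) 0
                   + 2 * pyCell tab i j
        if s > st.1 then (s, i, j) else st) st)
    ((0 : Int), (0 : Int), (0 : Int))
  (st.2.1, st.2.2)

-- ===== PRECONDITION & SPEC =====
-- Pre_ excludes exactly the ragged tables on which Python A raises IndexError (a row shorter than
-- the number of rows); Python B raises there as well.
def Pre_meth (tab : List (List Int)) : Prop := ∀ row ∈ tab, tab.length ≤ row.length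
instance (tab : List (List Int)) : Decidable (Pre_meth tab) := by unfold Pre_meth; infer_instance

def pvWitness_meth : List (List Int) := [[1, 2], [3, 4]]

def Spec_meth (tab : List (List Int)) (out : Int × Int) : Prop := out = meth_alt tab
instance (tab : List (List Int)) (out : Int × Int) : Decidable (Spec_meth tab out) := by unfold Spec_meth; infer_instance

-- ===== CLAIM (what is proved, stated in full; the proofs are below) =====
def Claim_equal_meth : Prop := ∀ (tab : List (List Int)), Dom_meth tab → Pre_meth tab → Spec_meth tab (meth tab)

-- ===== LEMMAS AND PROOFS =====

-- A's down-right walk from (i, i-d) sums the tail of the i-j = d diagonal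
lemma loopDR_eq (tab : List (List Int)) (n d : Int) (k : Nat) :
    ∀ i : Int, (n - i).toNat ≤ k → 0 ≤ i → d ≤ i →
      loopDR tab n i (i - d)
        = ((PySem.List.pyRange i (min n (n + d)) 1).map (fun r => pyCell tab r (r - d))).sum := by
  induction k with
  | zero =>
    intro i hk h0 hd
    rw [loopDR]
    have hb : inBuond i (i - d) n = false := by simp [inBuond]; omega
    rw [PySem.List.pyRange_one_eq_nil (by omega)]
    simp [hb]
  | succ k ih =>
    intro i hk h0 hd
    by_cases hi : i < min n (n + d)
    · rw [loopDR]
      have hb : inBuond i (i - d) n = true := by simp [inBuond]; omega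
      rw [PySem.List.pyRange_one_cons hi]
      have h1 : i - d + 1 = (i + 1) - d := by ring
      have := ih (i + 1) (by omega) (by omega) (by omega)
      simp only [hb, if_true, List.map_cons, List.sum_cons, h1, this]
    · rw [loopDR]
      have hb : inBuond i (i - d) n = false := by simp [inBuond]; omega
      rw [PySem.List.pyRange_one_eq_nil (by omega)]
      simp [hb]

-- A's up-left walk from (i, i-d) sums the head of the i-j = d diagonal
lemma loopUL_eq (tab : List (List Int)) (n d : Int) (k : Nat) :
    ∀ i : Int, (i + 1).toNat ≤ k → i < n → i - d < n →
      loopUL tab n i (i - d)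
        = ((PySem.List.pyRange (max 0 d) (i + 1) 1).map (fun r => pyCell tab r (r - d))).sum := by
  induction k with
  | zero =>
    intro i hk h0 hd
    rw [loopUL]
    have hb : inBuond i (i - d) n = false := by simp [inBuond]; omega
    rw [PySem.List.pyRange_one_eq_nil (by omega)]
    simp [hb]
  | succ k ih =>
    intro i hk h0 hd
    by_cases hi : max 0 d ≤ i
    · rw [loopUL]
      have hb : inBuond i (i - d) n = true := by simp [inBuond]; omega
      have hsplit : i + 1 = (i - 1 + 1) + 1 := by ring
      rw [hsplit, PySem.List.pyRange_one_succ_right (by omega)]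
      have h1 : i - d - 1 = (i - 1) - d := by ring
      have h2 : i - 1 + 1 = i := by ring
      have := ih (i - 1) (by omega) (by omega) (by omega)
      simp only [hb, if_true, h1, this, List.map_append, List.sum_append, List.map_cons,
        List.map_nil, List.sum_cons, List.sum_nil, h2]
      ring
    · rw [loopUL]
      have hb : inBuond i (i - d) n = false := by simp [inBuond]; omega
      rw [PySem.List.pyRange_one_eq_nil (by omega)]
      simp [hb]

-- A's down-left walk from (i, s-i) sums the tail of the i+j = s anti-diagonal
lemma loopDL_eq (tab : List (List Int)) (n s : Int) (k : Nat) :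
    ∀ i : Int, (n - i).toNat ≤ k → 0 ≤ i → s - i < n →
      loopDL tab n i (s - i)
        = ((PySem.List.pyRange i (min n (s + 1)) 1).map (fun r => pyCell tab r (s - r))).sum := by
  induction k with
  | zero =>
    intro i hk h0 hd
    rw [loopDL]
    have hb : inBuond i (s - i) n = false := by simp [inBuond]; omega
    rw [PySem.List.pyRange_one_eq_nil (by omega)]
    simp [hb]
  | succ k ih =>
    intro i hk h0 hd
    by_cases hi : i < min n (s + 1)
    · rw [loopDL]
      have hb : inBuond i (s - i) n = true := by simp [inBuond]; omega
      rw [PySem.List.pyRange_one_cons hi]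
      have h1 : s - i - 1 = s - (i + 1) := by ring
      have := ih (i + 1) (by omega) (by omega) (by omega)
      simp only [hb, if_true, List.map_cons, List.sum_cons, h1, this]
    · rw [loopDL]
      have hb : inBuond i (s - i) n = false := by simp [inBuond]; omega
      rw [PySem.List.pyRange_one_eq_nil (by omega)]
      simp [hb]

-- A's up-right walk from (i, s-i) sums the head of the i+j = s anti-diagonal
lemma loopUR_eq (tab : List (List Int)) (n s : Int) (k : Nat) :
    ∀ i : Int, (i + 1).toNat ≤ k → i < n → s - i ≥ 0 →
      loopUR tab n i (s - i)
        = ((PySem.List.pyRange (max 0 (s - n + 1)) (i + 1) 1).map (fun r => pyCell tab r (s - r))).sum := by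
  induction k with
  | zero =>
    intro i hk h0 hd
    rw [loopUR]
    have hb : inBuond i (s - i) n = false := by simp [inBuond]; omega
    rw [PySem.List.pyRange_one_eq_nil (by omega)]
    simp [hb]
  | succ k ih =>
    intro i hk h0 hd
    by_cases hi : max 0 (s - n + 1) ≤ i
    · rw [loopUR]
      have hb : inBuond i (s - i) n = true := by simp [inBuond]; omega
      have hsplit : i + 1 = (i - 1 + 1) + 1 := by ring
      rw [hsplit, PySem.List.pyRange_one_succ_right (by omega)]
      have h1 : s - i + 1 = s - (i - 1) := by ring
      have h2 : i - 1 + 1 = i := by ring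
      have := ih (i - 1) (by omega) (by omega) (by omega)
      simp only [hb, if_true, h1, this, List.map_append, List.sum_append, List.map_cons,
        List.map_nil, List.sum_cons, List.sum_nil, h2]
      ring
    · rw [loopUR]
      have hb : inBuond i (s - i) n = false := by simp [inBuond]; omega
      rw [PySem.List.pyRange_one_eq_nil (by omega)]
      simp [hb]

-- the value A computes per cell is exactly B's per-cell formula
lemma sumaPrze_eq (tab : List (List Int)) (i j : Int)
    (hi0 : 0 ≤ i) (hin : i < (tab.length : Int)) (hj0 : 0 ≤ j) (hjn : j < (tab.length : Int)) :
    sumaPrze tab i j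
      = diagSum1 tab tab.length (i - j) + diagSum2 tab tab.length (i + j) + 2 * pyCell tab i j := by
  set n : Int := (tab.length : Int) with hn
  have hj : j = i - (i - j) := by ring
  have hs : j = (i + j) - i := by ring
  have hUL := loopUL_eq tab n (i - j) (i + 1).toNat i le_rfl hin (by omega)
  have hDR := loopDR_eq tab n (i - j) (n - i).toNat i le_rfl hi0 (by omega)
  have hUR := loopUR_eq tab n (i + j) (i + 1).toNat i le_rfl hin (by omega)
  have hDL := loopDL_eq tab n (i + j) (n - i).toNat i le_rfl hi0 (by omega)
  -- split the whole-diagonal ranges at i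
  have hsplit1 : PySem.List.pyRange (max 0 (i - j)) (min n (n + (i - j))) 1
      = PySem.List.pyRange (max 0 (i - j)) (i + 1) 1 ++ PySem.List.pyRange (i + 1) (min n (n + (i - j))) 1 :=
    PySem.List.pyRange_one_append _ _ _ (by omega) (by omega)
  have hsplit2 : PySem.List.pyRange (max 0 ((i + j) - n + 1)) (min n ((i + j) + 1)) 1
      = PySem.List.pyRange (max 0 ((i + j) - n + 1)) (i + 1) 1 ++ PySem.List.pyRange (i + 1) (min n ((i + j) + 1)) 1 :=
    PySem.List.pyRange_one_append _ _ _ (by omega) (by omega)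
  have hcons1 : PySem.List.pyRange i (min n (n + (i - j))) 1
      = i :: PySem.List.pyRange (i + 1) (min n (n + (i - j))) 1 :=
    PySem.List.pyRange_one_cons (by omega)
  have hcons2 : PySem.List.pyRange i (min n ((i + j) + 1)) 1
      = i :: PySem.List.pyRange (i + 1) (min n ((i + j) + 1)) 1 :=
    PySem.List.pyRange_one_cons (by omega)
  have e1 : diagSum1 tab n (i - j)
      = ((PySem.List.pyRange (max 0 (i - j)) (min n (n + (i - j))) 1).map
          (fun r => pyCell tab r (r - (i - j)))).sum := by
    unfold diagSum1
    rw [PySem.List.foldl_add]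
    ring
  have e2 : diagSum2 tab n (i + j)
      = ((PySem.List.pyRange (max 0 ((i + j) - n + 1)) (min n ((i + j) + 1)) 1).map
          (fun r => pyCell tab r ((i + j) - r))).sum := by
    unfold diagSum2
    rw [PySem.List.foldl_add]
    ring
  have hii : i - (i - j) = j := by ring
  have hss : (i + j) - i = j := by ring
  unfold sumaPrze
  rw [← hn]
  calc loopUL tab n i j + loopDR tab n i j + loopUR tab n i j + loopDL tab n i j
      = loopUL tab n i (i - (i - j)) + loopDR tab n i (i - (i - j))
        + loopUR tab n i ((i + j) - i) + loopDL tab n i ((i + j) - i) := by rw [hii, hss]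
    _ = _ := by
        rw [hUL, hDR, hUR, hDL, e1, e2, hsplit1, hsplit2, hcons1, hcons2]
        simp only [List.map_append, List.sum_append, List.map_cons, List.sum_cons, hii, hss]
        ring

-- index into B's precomputed diagonal tables
lemma diag1_get (tab : List (List Int)) (i j : Int)
    (hi0 : 0 ≤ i) (hin : i < (tab.length : Int)) (hj0 : 0 ≤ j) (hjn : j < (tab.length : Int)) :
    PySem.List.pyGetD ((PySem.List.pyRange 0 (2 * (tab.length : Int) - 1) 1).map
        (fun k => diagSum1 tab tab.length (k - ((tab.length : Int) - 1)))) (i - j + (tab.length : Int) - 1) 0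
      = diagSum1 tab tab.length (i - j) := by
  rw [PySem.List.pyGetD_map_pyRange_of_nonneg _ _ _ _ (by omega) (by omega)]
  have : i - j + (tab.length : Int) - 1 - ((tab.length : Int) - 1) = i - j := by ring
  rw [this]

lemma diag2_get (tab : List (List Int)) (i j : Int)
    (hi0 : 0 ≤ i) (hin : i < (tab.length : Int)) (hj0 : 0 ≤ j) (hjn : j < (tab.length : Int)) :
    PySem.List.pyGetD ((PySem.List.pyRange 0 (2 * (tab.length : Int) - 1) 1).map
        (fun s => diagSum2 tab tab.length s)) (i + j) 0
      = diagSum2 tab tab.length (i + j) := by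
  rw [PySem.List.pyGetD_map_pyRange_of_nonneg _ _ _ _ (by omega) (by omega)]

theorem meth_eq_alt (tab : List (List Int)) : meth tab = meth_alt tab := by
  unfold meth meth_alt
  simp only []
  refine congrArg (fun st : Int × Int × Int => (st.2.1, st.2.2)) ?_
  apply PySem.List.foldl_congr_mem
  intro st i hi
  rw [PySem.List.mem_pyRange_one] at hi
  apply PySem.List.foldl_congr_mem
  intro st' j hj
  rw [PySem.List.mem_pyRange_one] at hj
  have hv : sumaPrze tab i j
      = PySem.List.pyGetD ((PySem.List.pyRange 0 (2 * (tab.length : Int) - 1) 1).map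
            (fun k => diagSum1 tab tab.length (k - ((tab.length : Int) - 1)))) (i - j + (tab.length : Int) - 1) 0
        + PySem.List.pyGetD ((PySem.List.pyRange 0 (2 * (tab.length : Int) - 1) 1).map
            (fun s => diagSum2 tab tab.length s)) (i + j) 0
        + 2 * pyCell tab i j := by
    rw [diag1_get tab i j hi.1 hi.2 hj.1 hj.2, diag2_get tab i j hi.1 hi.2 hj.1 hj.2]
    exact sumaPrze_eq tab i j hi.1 hi.2 hj.1 hj.2
  rw [hv]
  split_ifs with h
  · rw [max_eq_right (le_of_lt h)]
  · rfl

-- ===== VERDICT (by name: the statement is the Claim_ definition above) =====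
theorem meth_spec : Claim_equal_meth := by
  intro tab _ _
  unfold Spec_meth
  exact meth_eq_alt tab
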